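-- pv_equiv track=rewrite | github.com/gediontek/SpatialApp | nl_gis/query_patterns.py | _keyword_set_matches
-- ===== SOURCE A (Python) =====
-- def _keyword_set_matches(keyword_set: set[str], tokens: set[str], query_lower: str) -> bool:
--     """A keyword set matches if any of its members appears as a token OR
--     substring of the lowered query. Substring matching handles multi-word
--     phrases like 'near route' without building full n-gram indices."""
--     for kw in keyword_set:
--         if " " in kw:
--             if kw in query_lower:
--                 return True
--         elif kw in tokens:
--             return True
--     return False
-- ===== SOURCE B (Python) =====
-- def _keyword_set_matches(keyword_set: set[str], tokens: set[str], query_lower: str) -> bool: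
--     """Partition keywords into phrases (with a space) and single words, then
--     decide by one set intersection plus a phrase-only substring scan."""
--     phrases = []
--     words = set()
--     for kw in keyword_set:
--         if " " in kw:
--             phrases.append(kw)
--         else:
--             words.add(kw)
--     if words & tokens:
--         return True
--     return any(p in query_lower for p in phrases)
-- ===== Notes on version B (the rewrite author's own statement) =====
-- stated objective: alternative
-- what changed: Replaces the single interleaved branching loop with a partition pass (single words vs. phrases), a set-intersection test for the token match, and a phrase-only substring scan.
import Mathlib
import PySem

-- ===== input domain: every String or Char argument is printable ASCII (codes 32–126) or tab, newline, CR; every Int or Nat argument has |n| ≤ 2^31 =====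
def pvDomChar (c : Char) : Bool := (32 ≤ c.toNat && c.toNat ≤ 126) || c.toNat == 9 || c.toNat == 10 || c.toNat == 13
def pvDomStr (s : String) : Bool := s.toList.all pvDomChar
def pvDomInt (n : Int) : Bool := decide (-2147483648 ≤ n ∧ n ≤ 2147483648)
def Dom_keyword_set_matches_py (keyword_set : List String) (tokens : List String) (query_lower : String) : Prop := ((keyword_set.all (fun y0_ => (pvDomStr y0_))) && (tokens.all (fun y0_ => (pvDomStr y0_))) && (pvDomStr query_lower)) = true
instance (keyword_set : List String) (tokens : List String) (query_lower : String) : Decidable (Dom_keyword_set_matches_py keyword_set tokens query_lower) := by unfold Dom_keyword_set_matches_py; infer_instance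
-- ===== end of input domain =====

-- B partitions the keyword set into single words and phrases, then decides by a
-- set-intersection test plus a phrase-only substring scan (objective: alternative decomposition).

-- ===== PORT A =====
-- the for-loop of A with early return, over the remaining keywords
def pvA_go (tokens : List String) (query_lower : String) : List String → Bool
  | [] => false
  | kw :: rest =>
    if PySem.Str.isIn " " kw then
      if PySem.Str.isIn kw query_lower then true else pvA_go tokens query_lower rest
    else if tokens.contains kw then true else pvA_go tokens query_lower rest

def keyword_set_matches_py (keyword_set : List String) (tokens : List String) (query_lower : String) : Bool :=
  pvA_go tokens query_lower keyword_set

-- ===== PORT B =====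
-- B's partition loop: (phrases, words) accumulated over the keyword set
def pvB_partition (keyword_set : List String) : List String × PySem.Set String :=
  keyword_set.foldl
    (fun acc kw =>
      if PySem.Str.isIn " " kw then (acc.1 ++ [kw], acc.2)
      else (acc.1, PySem.Set.add acc.2 kw))
    ([], PySem.Set.empty)

def keyword_set_matches_py_alt (keyword_set : List String) (tokens : List String) (query_lower : String) : Bool :=
  let pw := pvB_partition keyword_set
  if PySem.Set.inter pw.2 tokens ≠ [] then true
  else pw.1.any (fun p => PySem.Str.isIn p query_lower)

-- ===== PRECONDITION & SPEC =====
def Spec_keyword_set_matches_py (keyword_set : List String) (tokens : List String) (query_lower : String) (out : Bool) : Prop := out = keyword_set_matches_py_alt keyword_set tokens query_lower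
instance (keyword_set : List String) (tokens : List String) (query_lower : String) (out : Bool) : Decidable (Spec_keyword_set_matches_py keyword_set tokens query_lower out) := by unfold Spec_keyword_set_matches_py; infer_instance

-- ===== CLAIM (what is proved, stated in full; the proofs are below) =====
def Claim_equal_keyword_set_matches_py : Prop := ∀ (keyword_set : List String) (tokens : List String) (query_lower : String), Dom_keyword_set_matches_py keyword_set tokens query_lower → Spec_keyword_set_matches_py keyword_set tokens query_lower (keyword_set_matches_py keyword_set tokens query_lower)

-- ===== LEMMAS AND PROOFS =====

-- A returns true iff some keyword matches (as a token or as a substring of the query)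
theorem pvA_go_iff (tokens : List String) (q : String) (l : List String) :
    pvA_go tokens q l = true ↔
      ∃ kw ∈ l, (if PySem.Str.isIn " " kw then PySem.Str.isIn kw q else tokens.contains kw) = true := by
  induction l with
  | nil => simp [pvA_go]
  | cons kw rest ih =>
    simp only [pvA_go]
    by_cases h : PySem.Chars.isIn [' '] kw.toList = true
    · by_cases h2 : PySem.Chars.isIn kw.toList q.toList = true
      · simp [h, h2]
      · simp [h, h2, ih]
    · by_cases h2 : kw ∈ tokens
      · simp [h, h2]
      · simp [h, h2, ih]

-- the partition invariant: phrases holds the space-containing keywords seen so far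
-- (in order), words has exactly the spaceless ones as members
theorem pvB_partition_inv (l : List String) (ph : List String) (wd : PySem.Set String) :
    (l.foldl
      (fun acc kw =>
        if PySem.Str.isIn " " kw then (acc.1 ++ [kw], acc.2)
        else (acc.1, PySem.Set.add acc.2 kw))
      (ph, wd)).1 = ph ++ l.filter (fun kw => PySem.Str.isIn " " kw) ∧
    ∀ x, x ∈ (l.foldl
      (fun acc kw =>
        if PySem.Str.isIn " " kw then (acc.1 ++ [kw], acc.2)
        else (acc.1, PySem.Set.add acc.2 kw))
      (ph, wd)).2 ↔ x ∈ wd ∨ (x ∈ l ∧ PySem.Str.isIn " " x = false) := by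
  induction l generalizing ph wd with
  | nil => simp
  | cons kw rest ih =>
    by_cases h : PySem.Chars.isIn [' '] kw.toList = true
    · have hstep : (fun (acc : List String × PySem.Set String) kw =>
          if PySem.Str.isIn " " kw then (acc.1 ++ [kw], acc.2)
          else (acc.1, PySem.Set.add acc.2 kw)) (ph, wd) kw = (ph ++ [kw], wd) := by
        simp [h]
      obtain ⟨ih1, ih2⟩ := ih (ph ++ [kw]) wd
      rw [List.foldl_cons]
      rw [show (if PySem.Str.isIn " " kw = true then ((ph, wd).1 ++ [kw], (ph, wd).2)
            else ((ph, wd).1, PySem.Set.add (ph, wd).2 kw)) = (ph ++ [kw], wd) from hstep]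
      refine ⟨by rw [ih1]; simp [h], ?_⟩
      intro x
      rw [ih2 x]
      constructor
      · rintro (hx | ⟨hx, hs⟩)
        · exact Or.inl hx
        · exact Or.inr ⟨List.mem_cons_of_mem _ hx, hs⟩
      · rintro (hx | ⟨hx, hs⟩)
        · exact Or.inl hx
        · rcases List.mem_cons.mp hx with rfl | hx
          · exact absurd h (by simp at hs ⊢; exact hs)
          · exact Or.inr ⟨hx, hs⟩
    · have hstep : (fun (acc : List String × PySem.Set String) kw =>
          if PySem.Str.isIn " " kw then (acc.1 ++ [kw], acc.2)
          else (acc.1, PySem.Set.add acc.2 kw)) (ph, wd) kw = (ph, PySem.Set.add wd kw) := by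
        simp [h]
      obtain ⟨ih1, ih2⟩ := ih ph (PySem.Set.add wd kw)
      rw [List.foldl_cons]
      rw [show (if PySem.Str.isIn " " kw = true then ((ph, wd).1 ++ [kw], (ph, wd).2)
            else ((ph, wd).1, PySem.Set.add (ph, wd).2 kw)) = (ph, PySem.Set.add wd kw) from hstep]
      refine ⟨by rw [ih1]; simp [h], ?_⟩
      intro x
      rw [ih2 x, PySem.Set.mem_add]
      constructor
      · rintro ((hx | rfl) | ⟨hx, hs⟩)
        · exact Or.inl hx
        · exact Or.inr ⟨List.mem_cons_self, by simpa using h⟩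
        · exact Or.inr ⟨List.mem_cons_of_mem _ hx, hs⟩
      · rintro (hx | ⟨hx, hs⟩)
        · exact Or.inl (Or.inl hx)
        · rcases List.mem_cons.mp hx with rfl | hx
          · exact Or.inl (Or.inr rfl)
          · exact Or.inr ⟨hx, hs⟩

-- B returns true iff some keyword matches
theorem pvB_iff (ks tokens : List String) (q : String) :
    keyword_set_matches_py_alt ks tokens q = true ↔
      ∃ kw ∈ ks, (if PySem.Str.isIn " " kw then PySem.Str.isIn kw q else tokens.contains kw) = true := by
  unfold keyword_set_matches_py_alt pvB_partition
  obtain ⟨h1, h2⟩ := pvB_partition_inv ks [] PySem.Set.empty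
  by_cases hi : PySem.Set.inter
      (ks.foldl (fun acc kw =>
        if PySem.Str.isIn " " kw then (acc.1 ++ [kw], acc.2)
        else (acc.1, PySem.Set.add acc.2 kw)) ([], PySem.Set.empty)).2 tokens = []
  · simp only [hi, ne_eq, not_true_eq_false, if_false, h1, List.nil_append]
    constructor
    · intro h
      rcases List.any_eq_true.mp h with ⟨p, hp, hps⟩
      have hmem := List.mem_filter.mp hp
      refine ⟨p, hmem.1, ?_⟩
      have hsp : PySem.Str.isIn " " p = true := hmem.2
      rw [if_pos hsp]
      exact hps
    · rintro ⟨kw, hkw, hm⟩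
      by_cases hs : PySem.Chars.isIn [' '] kw.toList = true
      · refine List.any_eq_true.mpr ⟨kw, List.mem_filter.mpr ⟨hkw, by simpa using hs⟩, ?_⟩
        simpa [hs] using hm
      · -- kw is spaceless and in tokens, so the intersection is nonempty: contradiction
        exfalso
        have hkwtok : kw ∈ tokens := by simpa [hs] using hm
        have hmm : kw ∈ PySem.Set.inter
            (ks.foldl (fun acc kw =>
              if PySem.Str.isIn " " kw then (acc.1 ++ [kw], acc.2)
              else (acc.1, PySem.Set.add acc.2 kw)) ([], PySem.Set.empty)).2 tokens := by
          rw [PySem.Set.mem_inter]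
          exact ⟨(h2 kw).mpr (Or.inr ⟨hkw, by simpa using hs⟩), hkwtok⟩
        rw [hi] at hmm
        simp at hmm
  · simp only [hi, ne_eq, not_false_eq_true, if_true, true_iff]
    rcases List.exists_mem_of_ne_nil _ hi with ⟨x, hx⟩
    rw [PySem.Set.mem_inter] at hx
    rcases (h2 x).mp hx.1 with h0 | ⟨hxl, hxs⟩
    · simp [PySem.Set.empty] at h0
    · have hxs' : PySem.Chars.isIn [' '] x.toList = false := by simpa using hxs
      refine ⟨x, hxl, ?_⟩
      rw [if_neg (by simp [hxs'])]
      simpa using hx.2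

-- ===== VERDICT (by name: the statement is the Claim_ definition above) =====
theorem keyword_set_matches_py_spec : Claim_equal_keyword_set_matches_py := by
  intro ks tokens q _
  unfold Spec_keyword_set_matches_py keyword_set_matches_py
  refine Bool.eq_iff_iff.mpr ?_
  rw [pvA_go_iff, pvB_iff]
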